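-- pv_equiv track=rewrite | github.com/artcomp/avaliageo | info_extract.py | putButtonIndex
-- ===== SOURCE A (Python) =====
-- def putButtonIndex(string):
-- 	split_string =  string.split()
-- 	index_toponimo = 0
-- 	j = 0
-- 	lista = []
-- 	for i in split_string:
-- 		if '<button' in i:
-- 			i = i + ' data-target="#quest_'+ str(index_toponimo) +'" '
-- 			lista.append((i,j))
-- 			index_toponimo = index_toponimo + 1
-- 		j = j + 1
--
-- 	for i in range(len(lista)):
-- 		split_string[lista[i][1]] = lista[i][0]
--
-- 	return ' '.join(split_string)
-- ===== SOURCE B (Python) =====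
-- def putButtonIndex(string):
--     out = []
--     count = 0
--     for tok in string.split():
--         if '<button' in tok:
--             tok = tok + ' data-target="#quest_' + str(count) + '" '
--             count = count + 1
--         out.append(tok)
--     return ' '.join(out)
-- ===== Notes on version B (the rewrite author's own statement) =====
-- stated objective: simpler
-- what changed: B builds the output token list directly in one pass with a running counter, dropping A's intermediate list of (modified token, position) pairs and its second write-back loop over that list.
import Mathlib
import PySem

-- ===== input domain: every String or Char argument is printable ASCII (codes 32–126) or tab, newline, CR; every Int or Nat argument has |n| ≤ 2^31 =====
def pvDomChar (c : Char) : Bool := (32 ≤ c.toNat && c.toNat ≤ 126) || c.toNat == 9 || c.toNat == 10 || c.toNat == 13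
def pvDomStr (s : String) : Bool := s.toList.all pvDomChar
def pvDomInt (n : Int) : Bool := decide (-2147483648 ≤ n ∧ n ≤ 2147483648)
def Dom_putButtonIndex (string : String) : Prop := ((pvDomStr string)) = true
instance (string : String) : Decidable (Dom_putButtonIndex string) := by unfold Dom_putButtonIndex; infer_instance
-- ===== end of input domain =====

-- B (putButtonIndex_alt) builds the output token list directly in one pass with a running counter, replacing A's edit-table-then-write-back shape; same result, simpler.


-- ===== PORT A =====
-- one-pass B builds the output directly; A's edit-table-and-write-back shape kept literally below
def pvLoopA : List String → Int → Int → List (String × Int) → List (String × Int)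
  | [], _, _, lista => lista
  | i :: rest, idx, j, lista =>
    if PySem.Str.isIn "<button" i then
      pvLoopA rest (idx + 1) (j + 1)
        (lista ++ [(i ++ " data-target=\"#quest_" ++ PySem.Int.toStr idx ++ "\" ", j)])
    else pvLoopA rest idx (j + 1) lista

-- the write-back loop: iterates lista in order, assigning split_string[p.2] = p.1
def pvWriteA : List (String × Int) → List String → List String
  | [], ss => ss
  | (s, j) :: rest, ss => pvWriteA rest (PySem.List.pySetD ss j s)

def putButtonIndex (string : String) : String :=
  let split_string := PySem.Str.split₀ string
  PySem.Str.join " " (pvWriteA (pvLoopA split_string 0 0 []) split_string)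

-- ===== PORT B =====
def pvLoopB : List String → Int → List String → List String
  | [], _, out => out
  | tok :: rest, count, out =>
    if PySem.Str.isIn "<button" tok then
      pvLoopB rest (count + 1)
        (out ++ [tok ++ " data-target=\"#quest_" ++ PySem.Int.toStr count ++ "\" "])
    else pvLoopB rest count (out ++ [tok])

def putButtonIndex_alt (string : String) : String :=
  PySem.Str.join " " (pvLoopB (PySem.Str.split₀ string) 0 [])

-- ===== PRECONDITION & SPEC =====
def Spec_putButtonIndex (string : String) (out : String) : Prop := out = putButtonIndex_alt string
instance (string : String) (out : String) : Decidable (Spec_putButtonIndex string out) := by unfold Spec_putButtonIndex; infer_instance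

-- ===== CLAIM (what is proved, stated in full; the proofs are below) =====
def Claim_equal_putButtonIndex : Prop := ∀ (string : String), Dom_putButtonIndex string → Spec_putButtonIndex string (putButtonIndex string)

-- ===== LEMMAS AND PROOFS =====
theorem pvLoopA_acc (ts : List String) (k j : Int) (lista : List (String × Int)) :
    pvLoopA ts k j lista = lista ++ pvLoopA ts k j [] := by
  induction ts generalizing k j lista with
  | nil => simp [pvLoopA]
  | cons t ts ih =>
    simp only [pvLoopA]
    split_ifs with h
    · rw [ih]; conv_rhs => rw [ih]
      simp
    · exact ih ..

theorem pvLoopB_acc (ts : List String) (k : Int) (out : List String) :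
    pvLoopB ts k out = out ++ pvLoopB ts k [] := by
  induction ts generalizing k out with
  | nil => simp [pvLoopB]
  | cons t ts ih =>
    simp only [pvLoopB]
    split_ifs with h
    · rw [ih]; conv_rhs => rw [ih]
      simp
    · rw [ih]; conv_rhs => rw [ih]
      simp

theorem pv_main (ts : List String) (k : Int) (pre : List String) :
    pvWriteA (pvLoopA ts k (pre.length : Int) []) (pre ++ ts) = pre ++ pvLoopB ts k [] := by
  induction ts generalizing k pre with
  | nil => simp [pvLoopA, pvLoopB, pvWriteA]
  | cons t ts ih =>
    simp only [pvLoopA, pvLoopB]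
    split_ifs with h
    · rw [pvLoopA_acc, pvLoopB_acc]
      simp only [List.singleton_append, List.nil_append, pvWriteA, PySem.List.pySetD_natCast]
      have hset : (pre ++ t :: ts).set pre.length
          (t ++ " data-target=\"#quest_" ++ PySem.Int.toStr k ++ "\" ") =
          (pre ++ [t ++ " data-target=\"#quest_" ++ PySem.Int.toStr k ++ "\" "]) ++ ts := by
        rw [List.set_append_right _ _ (le_refl _)]
        simp
      rw [hset]
      have := ih (k + 1) (pre ++ [t ++ " data-target=\"#quest_" ++ PySem.Int.toStr k ++ "\" "])
      simp only [List.length_append, List.length_cons, List.length_nil] at this ⊢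
      push_cast at this ⊢
      rw [this]
      simp
    · rw [pvLoopB_acc]
      have := ih k (pre ++ [t])
      simp only [List.length_append, List.length_cons, List.length_nil] at this ⊢
      push_cast at this ⊢
      rw [show (pre ++ [t]) ++ ts = pre ++ t :: ts by simp] at this
      rw [this]
      simp

-- ===== VERDICT (by name: the statement is the Claim_ definition above) =====
theorem putButtonIndex_spec : Claim_equal_putButtonIndex := by
  intro string _
  unfold Spec_putButtonIndex putButtonIndex putButtonIndex_alt
  have := pv_main (PySem.Str.split₀ string) 0 []
  simpa using congrArg (PySem.Str.join " ") this
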